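-- pv_equiv track=rewrite | github.com/AlmazSamatov/c-lexical-analyzer | util.py | delete_comments_universal
-- ===== SOURCE A (Python) =====
-- def to_str(list):
--     return ''.join(list)
--
-- def delete_comments_universal(code, begin_str, end_str):
--     indexes = []
--     current_index = code.find(begin_str, 0)
--     while current_index != -1:
--         next_end_index = code.find(end_str, current_index)
--         if next_end_index == -1:
--             indexes.append((current_index, len(code) - 1))
--         else:
--             indexes.append((current_index, next_end_index + len(end_str) - 1))
--         current_index = code.find('//', next_end_index)
--     return delete_from_string_indexes(code, indexes)
--
-- def delete_from_string_indexes(code, indexes):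
--     if len(indexes) == 0:
--         return code
--     new_code = []
--     curr_index = 0
--     for i, (start, end) in enumerate(indexes):
--         new_code.append(code[curr_index:start])
--         curr_index = end + 1
--         if i == len(indexes) - 1:
--             new_code.append(code[curr_index:len(code)])
--     return to_str(new_code)
-- ===== SOURCE B (Python) =====
-- def delete_comments_universal(code, begin_str, end_str):
--     # Fused single pass: collect kept slices directly instead of building an
--     # index list and deleting in a second pass.
--     pieces = []
--     curr = 0
--     current_index = code.find(begin_str, 0)
--     while current_index != -1:
--         pieces.append(code[curr:current_index])
--         next_end_index = code.find(end_str, current_index)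
--         if next_end_index == -1:
--             end = len(code) - 1
--         else:
--             end = next_end_index + len(end_str) - 1
--         curr = end + 1
--         current_index = code.find('//', next_end_index)
--     pieces.append(code[curr:len(code)])
--     return ''.join(pieces)
-- ===== Notes on version B (the rewrite author's own statement) =====
-- stated objective: simpler
-- what changed: Fused A's two passes (build an (start,end) index list, then a second enumerate-and-delete pass over that list) into one loop that appends the kept slices directly and joins them, dropping the intermediate index list and the helper functions.
import Mathlib
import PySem

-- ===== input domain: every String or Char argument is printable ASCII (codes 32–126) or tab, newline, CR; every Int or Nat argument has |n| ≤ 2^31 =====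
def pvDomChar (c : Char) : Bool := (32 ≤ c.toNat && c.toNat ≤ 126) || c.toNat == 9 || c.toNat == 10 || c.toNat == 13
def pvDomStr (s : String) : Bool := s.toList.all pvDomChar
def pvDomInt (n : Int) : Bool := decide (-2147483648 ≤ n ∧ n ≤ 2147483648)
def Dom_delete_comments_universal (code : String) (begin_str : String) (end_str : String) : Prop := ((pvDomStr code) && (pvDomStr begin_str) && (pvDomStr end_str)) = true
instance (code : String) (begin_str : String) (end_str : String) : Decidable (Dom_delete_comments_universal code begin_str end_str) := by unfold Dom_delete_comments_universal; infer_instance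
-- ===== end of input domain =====

-- B fuses A's two passes (collect (start,end) indexes, then delete) into one loop that
-- appends the kept slices directly; objective: simpler (one pass, no index list).

-- ===== PORT A =====
-- the while-loop of delete_comments_universal: state = (current_index, indexes);
-- fuel = code length + 3 bounds the iterations (current_index never decreases, so the
-- fuel is never exhausted when the Python loop terminates; both ports share the convention)
def pvLoopA (code : List Char) (es : List Char) : Nat → Int → List (Int × Int) → List (Int × Int)
  | 0, _, idxs => idxs
  | fuel + 1, ci, idxs =>
    if ci = -1 then idxs
    else
      let ne := PySem.Chars.findFrom code es ci none
      let idxs' := if ne = -1 then idxs ++ [(ci, (code.length : Int) - 1)]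
                   else idxs ++ [(ci, ne + (es.length : Int) - 1)]
      pvLoopA code es fuel (PySem.Chars.findFrom code ['/', '/'] ne none) idxs'

-- the for-loop of delete_from_string_indexes: appends code[curr:start] per pair and,
-- after the last pair (rest = []), code[curr:len(code)] — same pieces as the
-- 'i == len(indexes) - 1' check
def pvDelGo (code : List Char) : List (Int × Int) → Int → List (List Char)
  | [], curr => [PySem.Chars.slice code (some curr) (some (code.length : Int))]
  | (s, e) :: rest, curr => PySem.Chars.slice code (some curr) (some s) :: pvDelGo code rest (e + 1)

def pvDelete (code : List Char) (indexes : List (Int × Int)) : List Char :=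
  if indexes.length = 0 then code
  else PySem.Chars.join [] (pvDelGo code indexes 0)    -- to_str = ''.join

def delete_comments_universal (code : String) (begin_str : String) (end_str : String) : String :=
  String.mk (pvDelete code.toList (pvLoopA code.toList end_str.toList (code.toList.length + 3)
    (PySem.Chars.findFrom code.toList begin_str.toList 0 none) []))

-- ===== PORT B =====
-- B's single while-loop: state = (current_index, curr, pieces); after the loop it
-- appends code[curr:len(code)] and joins
def pvLoopB (code : List Char) (es : List Char) : Nat → Int → Int → List (List Char) → List Char
  | 0, _, curr, acc =>
    PySem.Chars.join [] (acc ++ [PySem.Chars.slice code (some curr) (some (code.length : Int))])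
  | fuel + 1, ci, curr, acc =>
    if ci = -1 then
      PySem.Chars.join [] (acc ++ [PySem.Chars.slice code (some curr) (some (code.length : Int))])
    else
      let piece := PySem.Chars.slice code (some curr) (some ci)
      let ne := PySem.Chars.findFrom code es ci none
      let e := if ne = -1 then (code.length : Int) - 1 else ne + (es.length : Int) - 1
      pvLoopB code es fuel (PySem.Chars.findFrom code ['/', '/'] ne none) (e + 1) (acc ++ [piece])

def delete_comments_universal_alt (code : String) (begin_str : String) (end_str : String) : String :=
  String.mk (pvLoopB code.toList end_str.toList (code.toList.length + 3)
    (PySem.Chars.findFrom code.toList begin_str.toList 0 none) 0 [])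

-- ===== PRECONDITION & SPEC =====
def Spec_delete_comments_universal (code : String) (begin_str : String) (end_str : String) (out : String) : Prop := out = delete_comments_universal_alt code begin_str end_str
instance (code : String) (begin_str : String) (end_str : String) (out : String) : Decidable (Spec_delete_comments_universal code begin_str end_str out) := by unfold Spec_delete_comments_universal; infer_instance

-- ===== CLAIM (what is proved, stated in full; the proofs are below) =====
def Claim_equal_delete_comments_universal : Prop := ∀ (code : String) (begin_str : String) (end_str : String), Dom_delete_comments_universal code begin_str end_str → Spec_delete_comments_universal code begin_str end_str (delete_comments_universal code begin_str end_str)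

-- ===== LEMMAS AND PROOFS =====

-- the pieces both programs cut the code into, in one recursion (proof helper)
def pvPieces (code : List Char) (es : List Char) : Nat → Int → Int → List (List Char)
  | 0, _, curr => [PySem.Chars.slice code (some curr) (some (code.length : Int))]
  | fuel + 1, ci, curr =>
    if ci = -1 then [PySem.Chars.slice code (some curr) (some (code.length : Int))]
    else
      let ne := PySem.Chars.findFrom code es ci none
      let e := if ne = -1 then (code.length : Int) - 1 else ne + (es.length : Int) - 1
      PySem.Chars.slice code (some curr) (some ci) ::
        pvPieces code es fuel (PySem.Chars.findFrom code ['/', '/'] ne none) (e + 1)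

theorem pvLoopA_append (code es : List Char) (fuel : Nat) :
    ∀ (ci : Int) (idxs : List (Int × Int)),
      pvLoopA code es fuel ci idxs = idxs ++ pvLoopA code es fuel ci [] := by
  induction fuel with
  | zero => intro ci idxs; simp [pvLoopA]
  | succ n ih =>
    intro ci idxs
    by_cases h : ci = -1
    · simp [pvLoopA, h]
    · simp only [pvLoopA, h, if_false]
      by_cases h2 : PySem.Chars.findFrom code es ci none = -1 <;>
        simp only [h2, if_true, if_false] <;>
        rw [ih, ih _ ([] ++ _)] <;> simp

theorem pvDelGo_loopA_eq_pieces (code es : List Char) (fuel : Nat) :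
    ∀ (ci curr : Int),
      pvDelGo code (pvLoopA code es fuel ci []) curr = pvPieces code es fuel ci curr := by
  induction fuel with
  | zero => intro ci curr; simp [pvLoopA, pvPieces, pvDelGo]
  | succ n ih =>
    intro ci curr
    by_cases h : ci = -1
    · simp [pvLoopA, pvPieces, pvDelGo, h]
    · simp only [pvLoopA, pvPieces, h, if_false]
      by_cases h2 : PySem.Chars.findFrom code es ci none = -1 <;>
        simp only [h2, ite_true, ite_false, List.nil_append] <;>
        rw [pvLoopA_append] <;> simp [pvDelGo, ih]

theorem pvLoopB_eq_join_pieces (code es : List Char) (fuel : Nat) :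
    ∀ (ci curr : Int) (acc : List (List Char)),
      pvLoopB code es fuel ci curr acc =
        PySem.Chars.join [] (acc ++ pvPieces code es fuel ci curr) := by
  induction fuel with
  | zero => intro ci curr acc; simp [pvLoopB, pvPieces]
  | succ n ih =>
    intro ci curr acc
    by_cases h : ci = -1
    · simp [pvLoopB, pvPieces, h]
    · simp only [pvLoopB, pvPieces, h, if_false]
      rw [ih]
      simp

-- ===== VERDICT (by name: the statement is the Claim_ definition above) =====
theorem delete_comments_universal_spec : Claim_equal_delete_comments_universal := by
  intro code begin_str end_str _
  unfold Spec_delete_comments_universal delete_comments_universal delete_comments_universal_alt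
  rw [pvLoopB_eq_join_pieces, ← pvDelGo_loopA_eq_pieces]
  unfold pvDelete
  rcases eq_or_ne (pvLoopA code.toList end_str.toList (code.toList.length + 3)
      (PySem.Chars.findFrom code.toList begin_str.toList 0 none) []) [] with h | h
  · rw [h]
    simp [pvDelGo]
    rw [List.take_of_length_le (by simp)]
  · rw [if_neg (mt List.length_eq_zero_iff.mp h)]
    simp
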